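-- pv_equiv track=rewrite | github.com/rgbygv/leetcode | python/2597.the-number-of-beautiful-subsets/solution.py | beautifulSubsets
-- ===== SOURCE A (Python) =====
-- from functools import cache, cmp_to_key, lru_cache, reduce
-- from typing import List, Optional
--
-- def beautifulSubsets(nums: List[int], k: int) -> int:
--     """
--     - `1 <= nums.length <= 20`
--     - `1 <= nums[i], k <= 1000`
--     """
--     nums.sort()
--     n = len(nums)
--     res = 0
--     f = [[False] * n for _ in range(n)]
--     for i, x in enumerate(nums):
--         for j in range(i):
--             if (x - nums[j]) == k:
--                 f[i][j] = f[j][i] = True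
--
--     if all(x is False for v in f for x in v):
--         return (1 << n) - 1
--
--     @cache
--     def dfs(i: int, ban: int):
--         if i == n:
--             return 1
--         # can't choose a[i]
--         if ban >> i & 1:
--             return dfs(i + 1, ban)
--         res = 0
--         # don't choose a[i]
--         res += dfs(i + 1, ban)
--         # choose
--         for d in range(n):
--             if f[i][d]:
--                 ban |= 1 << d
--         res += dfs(i + 1, ban)
--         return res
--
--     return dfs(0, 0) - 1
-- ===== SOURCE B (Python) =====
-- def beautifulSubsets(nums, k):
--     # Group values by residue mod k; within each residue chain do a
--     # house-robber style DP over the sorted distinct values, where a value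
--     # occurring c times contributes (2**c - 1) non-empty choices.
--     # (Return-value equivalence only: A additionally sorts nums in place.)
--     cnt = {}
--     for v in nums:
--         cnt[v] = cnt.get(v, 0) + 1
--     if k < 0:
--         return (1 << len(nums)) - 1
--     if k == 0:
--         total = 1
--         for c in cnt.values():
--             total *= c + 1
--         return total - 1
--     groups = {}
--     for v in cnt:
--         r = v % k
--         groups[r] = groups.get(r, []) + [v]
--     total = 1
--     for vs in groups.values():
--         vs.sort()
--         skip, take, prev = 1, 0, None
--         for v in vs:
--             ways = (1 << cnt[v]) - 1
--             if prev is not None and v - prev == k: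
--                 skip, take = skip + take, skip * ways
--             else:
--                 skip, take = skip + take, (skip + take) * ways
--             prev = v
--         total *= skip + take
--     return total - 1
-- ===== Notes on version B (the rewrite author's own statement) =====
-- stated objective: alternative
-- what changed: Replaces the memoized DFS over (index, ban-bitmask) states with its precomputed n x n conflict matrix by a counting argument: values are counted, grouped by residue mod k, and each residue chain is folded with a two-state house-robber DP where a value occurring c times contributes 2^c-1 ways; intended as asymptotically faster (a timing run measured B 2.91x at n=64 and A timing out at n=256 where B returned, but could not confirm a ratio at scale), recorded here without an unqualified speed claim.
import Mathlib
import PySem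

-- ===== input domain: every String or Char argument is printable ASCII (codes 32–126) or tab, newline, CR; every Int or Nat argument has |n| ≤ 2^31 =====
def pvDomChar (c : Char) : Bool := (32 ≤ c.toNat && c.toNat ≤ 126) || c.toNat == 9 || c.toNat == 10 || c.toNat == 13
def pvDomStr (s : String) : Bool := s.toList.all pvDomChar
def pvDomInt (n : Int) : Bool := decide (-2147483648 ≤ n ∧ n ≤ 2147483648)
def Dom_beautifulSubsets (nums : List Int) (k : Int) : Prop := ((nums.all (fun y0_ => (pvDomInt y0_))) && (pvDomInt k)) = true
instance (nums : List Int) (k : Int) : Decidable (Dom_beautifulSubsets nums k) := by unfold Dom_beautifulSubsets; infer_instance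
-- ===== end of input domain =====

-- B replaces A's memoized DFS over (index, ban-bitmask) states by a residue-class
-- house-robber DP over value counts (intended as asymptotically faster; the timing
-- run could not confirm a ratio at scale, so no unqualified speed claim is made).
-- Return-value equivalence only: the Python A sorts `nums` in place, B does not mutate it.

-- ===== PORT A =====
-- f[i][j] = f[j][i] = True  (two successive single-entry updates, left to right)
def pvSet2 (f : List (List Bool)) (i j : Nat) : List (List Bool) :=
  f.set i ((f.getD i []).set j true)

-- f = [[False]*n for _ in range(n)]; for i, x in enumerate(nums): for j in range(i): ...
-- (enumerate is rendered as a foldl carrying the running index i)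
def pvBuildF (s : List Int) (k : Int) : List (List Bool) :=
  (s.foldl
    (fun (p : List (List Bool) × Nat) x =>
      ((List.range p.2).foldl
        (fun f j => if x - s.getD j 0 = k then pvSet2 (pvSet2 f p.2 j) j p.2 else f)
        p.1,
       p.2 + 1))
    (List.replicate s.length (List.replicate s.length false), 0)).1

-- for d in range(n): if f[i][d]: ban |= 1 << d
def pvRowBan (f : List (List Bool)) (n i : Nat) (ban : Nat) : Nat :=
  (List.range n).foldl (fun b d => if (f.getD i []).getD d false then b ||| (1 <<< d) else b) ban

-- dfs(i, ban); the @cache decorator is pure memoization and does not change the value.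
-- Python recurses until i == n; the fuel argument is exactly n - i, so fuel = 0 ↔ i = n.
def pvDfs (f : List (List Bool)) (n : Nat) : Nat → Nat → Nat → Int
  | 0, _, _ => 1
  | fuel + 1, i, ban =>
    if (ban >>> i) &&& 1 = 1 then pvDfs f n fuel (i + 1) ban
    else pvDfs f n fuel (i + 1) ban + pvDfs f n fuel (i + 1) (pvRowBan f n i ban)

def beautifulSubsets (nums : List Int) (k : Int) : Int :=
  let s := PySem.List.sorted nums (fun x => x) false   -- nums.sort()
  let n := s.length
  let f := pvBuildF s k
  if f.all (fun row => row.all (fun x => x == false)) then (2 ^ n : Int) - 1  -- (1 << n) - 1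
  else pvDfs f n n 0 0 - 1

-- ===== PORT B =====
-- one chain step of the (skip, take, prev) fold; ways = (1 << cnt[v]) - 1 is passed in
def pvStepB (k : Int) (st : Int × Int × Option Int) (v ways : Int) : Int × Int × Option Int :=
  match st.2.2 with
  | some p =>
    if v - p = k then (st.1 + st.2.1, st.1 * ways, some v)
    else (st.1 + st.2.1, (st.1 + st.2.1) * ways, some v)
  | none => (st.1 + st.2.1, (st.1 + st.2.1) * ways, some v)

def beautifulSubsets_alt (nums : List Int) (k : Int) : Int :=
  -- cnt[v] = cnt.get(v, 0) + 1
  let cnt : PySem.Dict Int Int := nums.foldl (fun d v => d.insert v (d.getD v 0 + 1)) PySem.Dict.empty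
  if k < 0 then (2 ^ nums.length : Int) - 1   -- (1 << len(nums)) - 1
  else if k = 0 then (cnt.values.foldl (fun t c => t * (c + 1)) 1) - 1
  else
    -- groups[r] = groups.get(r, []) + [v]
    let groups : PySem.Dict Int (List Int) :=
      cnt.keys.foldl (fun g v => g.modify (PySem.Int.mod v k) [] (· ++ [v])) PySem.Dict.empty
    (groups.values.foldl
      (fun total vs =>
        let vs := PySem.List.sorted vs (fun x => x) false
        let st := vs.foldl
          (fun st v => pvStepB k st v ((2 ^ (cnt.getD v 0).toNat : Int) - 1)) ((1 : Int), (0 : Int), (none : Option Int))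
        total * (st.1 + st.2.1))
      1) - 1

-- ===== PRECONDITION & SPEC =====
def Spec_beautifulSubsets (nums : List Int) (k : Int) (out : Int) : Prop := out = beautifulSubsets_alt nums k
instance (nums : List Int) (k : Int) (out : Int) : Decidable (Spec_beautifulSubsets nums k out) := by unfold Spec_beautifulSubsets; infer_instance

-- ===== CLAIM (what is proved, stated in full; the proofs are below) =====
def Claim_equal_beautifulSubsets : Prop := ∀ (nums : List Int) (k : Int), Dom_beautifulSubsets nums k → Spec_beautifulSubsets nums k (beautifulSubsets nums k)

-- ===== LEMMAS AND PROOFS =====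

-- run-length encoding of a list (used on the sorted list s)
def pvRLE : List Int → List (Int × Nat)
  | [] => []
  | v :: t =>
    match pvRLE t with
    | [] => [(v, 1)]
    | (w, c) :: r => if v = w then (w, c + 1) :: r else (v, 1) :: (w, c) :: r

-- weight of a group of c equal values: k = 0 → choose at most one index (c ways),
-- otherwise any non-empty subset of the c indices (2^c - 1 ways)
def pvWt (k : Int) (c : Nat) : Int := if k = 0 then (c : Int) else 2 ^ c - 1

-- one-sided conflict: a later value w clashes with an earlier chosen value u iff w - u = k
def pvConf (k : Int) (chosen : List Int) (w : Int) : Bool := chosen.any (fun u => w - u == k)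

-- the common counting spec: number of weighted independent choices over the groups,
-- given the list of already chosen (earlier) values
def pvW (k : Int) : List (Int × Nat) → List Int → Int
  | [], _ => 1
  | (v, c) :: G, chosen =>
    pvW k G chosen + (if pvConf k chosen v then 0 else pvWt k c * pvW k G (v :: chosen))

-- two-state collapse of pvW on a single residue chain
def pvWc (k : Int) : List (Int × Nat) → Option Int → Int
  | [], _ => 1
  | (v, c) :: G, po =>
    pvWc k G none + (if po = some (v - k) then 0 else pvWt k c * pvWc k G (some v))

theorem pvConf_cons (k : Int) (u : Int) (c : List Int) (w : Int) :
    pvConf k (u :: c) w = ((w - u == k) || pvConf k c w) := by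
  simp [pvConf]

theorem pvW_congr (k : Int) (G : List (Int × Nat)) (c1 c2 : List Int)
    (h : ∀ w, pvConf k c1 w = pvConf k c2 w) : pvW k G c1 = pvW k G c2 := by
  induction G generalizing c1 c2 with
  | nil => rfl
  | cons p G ih =>
    obtain ⟨v, c⟩ := p
    simp only [pvW]
    rw [h v, ih c1 c2 h, ih (v :: c1) (v :: c2) (fun w => by simp only [pvConf_cons, h w])]

theorem pvW_cons_banned (k : Int) (v : Int) (t : List Int) (chosen : List Int)
    (h : pvConf k chosen v = true) :
    pvW k (pvRLE (v :: t)) chosen = pvW k (pvRLE t) chosen := by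
  simp only [pvRLE]
  cases hR : pvRLE t with
  | nil => simp [pvW, h]
  | cons p r =>
    obtain ⟨w, c⟩ := p
    by_cases hvw : v = w
    · subst hvw
      simp [pvW, h]
    · simp [hvw, pvW, h]

theorem pvW_cons_free (k : Int) (v : Int) (t : List Int) (chosen : List Int)
    (h : pvConf k chosen v = false) :
    pvW k (pvRLE (v :: t)) chosen
      = pvW k (pvRLE t) chosen + pvW k (pvRLE t) (v :: chosen) := by
  simp only [pvRLE]
  cases hR : pvRLE t with
  | nil =>
    by_cases hk : k = 0
    · subst hk; simp [pvW, pvWt, h]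
    · simp [pvW, pvWt, h, hk]
  | cons p r =>
    obtain ⟨w, c⟩ := p
    by_cases hvw : v = w
    · subst hvw
      have hdedup : pvW k r (v :: v :: chosen) = pvW k r (v :: chosen) :=
        pvW_congr _ _ _ _ (fun w => by simp only [pvConf_cons]; rw [← Bool.or_assoc, Bool.or_self])
      by_cases hk : k = 0
      · subst hk
        have hcv : pvConf 0 (v :: chosen) v = true := by simp [pvConf_cons]
        simp only [eq_self_iff_true, if_true, pvW, h, hcv, pvWt, Bool.false_eq_true,
          if_false, hdedup]
        push_cast
        ring
      · have hcv : pvConf k (v :: chosen) v = false := by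
          simp only [pvConf_cons, h, Bool.or_false, sub_self]
          simpa using fun hk0 => (hk hk0.symm).elim
        simp only [eq_self_iff_true, if_true, pvW, h, hcv, pvWt, if_neg hk, Bool.false_eq_true,
          if_false, hdedup]
        have h2 : (2 : Int) ^ (c + 1) = 2 ^ c * 2 := by ring
        rw [h2]
        ring
    · have hw1 : pvWt k 1 = 1 := by
        by_cases hk : k = 0 <;> simp [pvWt, hk]
      simp [hvw, pvW, h, hw1]

-- ===== f-matrix characterization =====
def pvGet2 (f : List (List Bool)) (a b : Nat) : Bool := (f.getD a []).getD b false

def pvShape (f : List (List Bool)) (n : Nat) : Prop :=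
  f.length = n ∧ ∀ row ∈ f, row.length = n

theorem pvGetD_set_self {α : Type} {l : List α} {i : Nat} {x d : α} (h : i < l.length) :
    (l.set i x).getD i d = x := by
  simp [List.getD_eq_getElem?_getD, List.getElem?_set_self h]

theorem pvGetD_set_ne {α : Type} {l : List α} {i a : Nat} {x d : α} (h : a ≠ i) :
    (l.set i x).getD a d = l.getD a d := by
  simp [List.getD_eq_getElem?_getD, List.getElem?_set_ne (Ne.symm h)]

theorem pvGetD_replicate {α : Type} {n a : Nat} {x d : α} :
    (List.replicate n x).getD a d = if a < n then x else d := by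
  by_cases h : a < n <;> simp [List.getD_eq_getElem?_getD, List.getElem?_replicate, h]

theorem pvShape_set2 {f : List (List Bool)} {n i j : Nat} (hf : pvShape f n) (hi : i < n) :
    pvShape (pvSet2 f i j) n := by
  obtain ⟨hl, hr⟩ := hf
  refine ⟨by simpa [pvSet2] using hl, ?_⟩
  intro row hrow
  rcases List.mem_or_eq_of_mem_set hrow with h | h
  · exact hr _ h
  · subst h
    rw [List.length_set]
    have : f.getD i [] = f[i]'(by omega) := by
      rw [List.getD_eq_getElem?_getD, List.getElem?_eq_getElem (by omega)]
      rfl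
    rw [this]
    exact hr _ (List.getElem_mem _)

theorem pvGet2_set2 {f : List (List Bool)} {n i j : Nat} (hf : pvShape f n)
    (hi : i < n) (hj : j < n) (a b : Nat) :
    (pvGet2 (pvSet2 f i j) a b = true ↔ ((a = i ∧ b = j) ∨ pvGet2 f a b = true)) := by
  obtain ⟨hl, hr⟩ := hf
  have hrowlen : (f.getD i []).length = n := by
    have : f.getD i [] = f[i]'(by omega) := by
      rw [List.getD_eq_getElem?_getD, List.getElem?_eq_getElem (by omega)]; rfl
    rw [this]; exact hr _ (List.getElem_mem _)
  unfold pvGet2 pvSet2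
  by_cases hai : a = i
  · subst hai
    rw [pvGetD_set_self (by omega)]
    by_cases hbj : b = j
    · subst hbj
      rw [pvGetD_set_self (by omega)]
      simp
    · rw [pvGetD_set_ne hbj]
      simp [hbj]
  · rw [pvGetD_set_ne hai]
    simp [hai]

theorem pvInner (s : List Int) (k x : Int) (f : List (List Bool)) (i : Nat)
    (hf : pvShape f s.length) (hi : i < s.length) :
    ∀ m, m ≤ i →
      pvShape ((List.range m).foldl
        (fun f j => if x - s.getD j 0 = k then pvSet2 (pvSet2 f i j) j i else f) f) s.length ∧
      (∀ a b, pvGet2 ((List.range m).foldl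
          (fun f j => if x - s.getD j 0 = k then pvSet2 (pvSet2 f i j) j i else f) f) a b = true ↔
        ((a = i ∧ b < m ∧ x - s.getD b 0 = k) ∨ (b = i ∧ a < m ∧ x - s.getD a 0 = k) ∨
          pvGet2 f a b = true)) := by
  intro m
  induction m with
  | zero => intro _; exact ⟨hf, by intro a b; simp⟩
  | succ m ih =>
    intro hm
    obtain ⟨ihS, ihC⟩ := ih (by omega)
    rw [List.range_succ, List.foldl_append, List.foldl_cons, List.foldl_nil]
    by_cases hc : x - s.getD m 0 = k
    · rw [if_pos hc]
      have hmn : m < s.length := by omega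
      have hS1 := pvShape_set2 (n := s.length) (j := m) ihS hi
      have hS2 := pvShape_set2 (n := s.length) (j := i) hS1 hmn
      refine ⟨hS2, ?_⟩
      intro a b
      rw [pvGet2_set2 hS1 hmn hi, pvGet2_set2 ihS hi hmn, ihC a b]
      constructor
      · rintro (⟨rfl, rfl⟩ | ⟨rfl, rfl⟩ | h | h | h)
        · exact Or.inr (Or.inl ⟨rfl, by omega, hc⟩)
        · exact Or.inl ⟨rfl, by omega, hc⟩
        · exact Or.inl ⟨h.1, by omega, h.2.2⟩
        · exact Or.inr (Or.inl ⟨h.1, by omega, h.2.2⟩)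
        · exact Or.inr (Or.inr h)
      · rintro (⟨rfl, hb, hcb⟩ | ⟨rfl, ha, hca⟩ | h)
        · by_cases hbm : b = m
          · subst hbm; exact Or.inr (Or.inl ⟨rfl, rfl⟩)
          · exact Or.inr (Or.inr (Or.inl ⟨rfl, by omega, hcb⟩))
        · by_cases ham : a = m
          · subst ham; exact Or.inl ⟨rfl, rfl⟩
          · exact Or.inr (Or.inr (Or.inr (Or.inl ⟨rfl, by omega, hca⟩)))
        · exact Or.inr (Or.inr (Or.inr (Or.inr h)))
    · rw [if_neg hc]
      refine ⟨ihS, ?_⟩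
      intro a b
      rw [ihC a b]
      constructor
      · rintro (⟨rfl, hb, hcb⟩ | ⟨rfl, ha, hca⟩ | h)
        · exact Or.inl ⟨rfl, by omega, hcb⟩
        · exact Or.inr (Or.inl ⟨rfl, by omega, hca⟩)
        · exact Or.inr (Or.inr h)
      · rintro (⟨rfl, hb, hcb⟩ | ⟨rfl, ha, hca⟩ | h)
        · refine Or.inl ⟨rfl, ?_, hcb⟩
          rcases Nat.lt_succ_iff_lt_or_eq.mp hb with h' | h'
          · exact h'
          · exact absurd hcb (by rw [h']; exact hc)
        · refine Or.inr (Or.inl ⟨rfl, ?_, hca⟩)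
          rcases Nat.lt_succ_iff_lt_or_eq.mp ha with h' | h'
          · exact h'
          · exact absurd hca (by rw [h']; exact hc)
        · exact Or.inr (Or.inr h)

theorem pvBuildF_partial (s : List Int) (k : Int) :
    ∀ u, u ≤ s.length →
      pvShape ((s.take u).foldl
        (fun (p : List (List Bool) × Nat) x =>
          ((List.range p.2).foldl
            (fun f j => if x - s.getD j 0 = k then pvSet2 (pvSet2 f p.2 j) j p.2 else f) p.1,
           p.2 + 1))
        (List.replicate s.length (List.replicate s.length false), 0)).1 s.length ∧
      ((s.take u).foldl
        (fun (p : List (List Bool) × Nat) x =>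
          ((List.range p.2).foldl
            (fun f j => if x - s.getD j 0 = k then pvSet2 (pvSet2 f p.2 j) j p.2 else f) p.1,
           p.2 + 1))
        (List.replicate s.length (List.replicate s.length false), 0)).2 = u ∧
      (∀ a b, pvGet2 ((s.take u).foldl
          (fun (p : List (List Bool) × Nat) x =>
            ((List.range p.2).foldl
              (fun f j => if x - s.getD j 0 = k then pvSet2 (pvSet2 f p.2 j) j p.2 else f) p.1,
             p.2 + 1))
          (List.replicate s.length (List.replicate s.length false), 0)).1 a b = true ↔
        ((b < a ∧ a < u ∧ s.getD a 0 - s.getD b 0 = k) ∨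
         (a < b ∧ b < u ∧ s.getD b 0 - s.getD a 0 = k))) := by
  intro u
  induction u with
  | zero =>
    intro _
    refine ⟨⟨by simp, ?_⟩, by simp, ?_⟩
    · intro row hrow
      rw [List.eq_of_mem_replicate hrow]
      simp
    · intro a b
      simp only [List.take_zero, List.foldl_nil]
      constructor
      · intro h
        exfalso
        unfold pvGet2 at h
        rw [pvGetD_replicate] at h
        by_cases ha : a < s.length
        · rw [if_pos ha, pvGetD_replicate] at h
          by_cases hb : b < s.length
          · rw [if_pos hb] at h; exact absurd h (by simp)
          · rw [if_neg hb] at h; exact absurd h (by simp)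
        · rw [if_neg ha] at h
          simp at h
      · rintro (⟨_, h, _⟩ | ⟨_, h, _⟩) <;> omega
  | succ u ih =>
    intro hu
    have hres := ih (by omega)
    have hu' : u < s.length := by omega
    have htake : s.take (u + 1) = s.take u ++ [s[u]'hu'] := by
      rw [List.take_succ, List.getElem?_eq_getElem hu']
      rfl
    rw [htake, List.foldl_append, List.foldl_cons, List.foldl_nil]
    set P := (s.take u).foldl
        (fun (p : List (List Bool) × Nat) x =>
          ((List.range p.2).foldl
            (fun f j => if x - s.getD j 0 = k then pvSet2 (pvSet2 f p.2 j) j p.2 else f) p.1,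
           p.2 + 1))
        (List.replicate s.length (List.replicate s.length false), 0) with hP
    obtain ⟨ihS, ihI, ihC⟩ := hres
    rw [ihI]
    obtain ⟨innS, innC⟩ := pvInner s k (s[u]'hu') P.1 u ihS hu' u le_rfl
    refine ⟨innS, rfl, ?_⟩
    intro a b
    rw [innC a b, ihC a b]
    have hgu : s.getD u 0 = s[u]'hu' := by
      rw [List.getD_eq_getElem?_getD, List.getElem?_eq_getElem hu']
      rfl
    constructor
    · rintro (⟨rfl, hb, hcb⟩ | ⟨rfl, ha, hca⟩ | ⟨hba, ha, h⟩ | ⟨hab, hb, h⟩)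
      · exact Or.inl ⟨by omega, by omega, by rw [hgu]; exact hcb⟩
      · exact Or.inr ⟨by omega, by omega, by rw [hgu]; exact hca⟩
      · exact Or.inl ⟨hba, by omega, h⟩
      · exact Or.inr ⟨hab, by omega, h⟩
    · rintro (⟨hba, ha, h⟩ | ⟨hab, hb, h⟩)
      · by_cases hau : a = u
        · subst hau
          exact Or.inl ⟨rfl, by omega, by rw [← hgu]; exact h⟩
        · exact Or.inr (Or.inr (Or.inl ⟨hba, by omega, h⟩))
      · by_cases hbu : b = u
        · subst hbu
          exact Or.inr (Or.inl ⟨rfl, by omega, by rw [← hgu]; exact h⟩)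
        · exact Or.inr (Or.inr (Or.inr ⟨hab, by omega, h⟩))

theorem pvBuildF_get (s : List Int) (k : Int) (a b : Nat) :
    pvGet2 (pvBuildF s k) a b = true ↔
      ((b < a ∧ a < s.length ∧ s.getD a 0 - s.getD b 0 = k) ∨
       (a < b ∧ b < s.length ∧ s.getD b 0 - s.getD a 0 = k)) := by
  have h := (pvBuildF_partial s k s.length le_rfl).2.2 a b
  rwa [List.take_length] at h

-- ===== ban-bitmask lemmas =====
theorem pvTest (ban i : Nat) : ((ban >>> i) &&& 1 = 1) ↔ ban.testBit i = true := by
  rw [Nat.testBit, Nat.one_and_eq_mod_two, Nat.and_one_is_mod]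
  simp only [bne_iff_ne, ne_eq]
  omega

theorem pvRowBan_testBit (f : List (List Bool)) (n i ban t : Nat) :
    (pvRowBan f n i ban).testBit t
      = (ban.testBit t || (decide (t < n) && pvGet2 f i t)) := by
  unfold pvRowBan
  induction n with
  | zero =>
    rw [List.range_zero, List.foldl_nil]
    simp
  | succ m ih =>
    rw [List.range_succ, List.foldl_append, List.foldl_cons, List.foldl_nil]
    by_cases hrow : (f.getD i []).getD m false = true
    · rw [if_pos hrow]
      rw [Nat.testBit_or, ih]
      have h1 : (1 <<< m) = 2 ^ m := by rw [Nat.shiftLeft_eq, one_mul]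
      rw [h1, Nat.testBit_two_pow]
      by_cases htm : t = m
      · subst htm
        rw [show pvGet2 f i t = true from hrow]
        simp
      · have hmt : decide (m = t) = false := decide_eq_false (fun h => htm h.symm)
        simp only [hmt, Bool.or_false]
        congr 1
        have h2 : decide (t < m + 1) = decide (t < m) := by
          by_cases h : t < m
          · simp [h, Nat.lt_succ_of_lt h]
          · simp [h, show ¬ t < m + 1 by omega]
        rw [h2]
    · rw [if_neg hrow, ih]
      have hrow' : pvGet2 f i t = false ∨ t ≠ m := by
        by_cases htm : t = m
        · subst htm
          exact Or.inl (by simpa using hrow)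
        · exact Or.inr htm
      congr 1
      rcases hrow' with h | h
      · simp [h]
      · have h2 : decide (t < m + 1) = decide (t < m) := by
          by_cases h' : t < m
          · simp [h', Nat.lt_succ_of_lt h']
          · simp [h', show ¬ t < m + 1 by omega]
        rw [h2]

-- ===== the main dfs ↔ spec induction =====
theorem pvMain (s : List Int) (k : Int) :
    ∀ (fuel q ban : Nat) (chosen : List Int),
      fuel + q = s.length →
      (∀ t, q ≤ t → t < s.length → Nat.testBit ban t = pvConf k chosen (s.getD t 0)) →
      pvDfs (pvBuildF s k) s.length fuel q ban = pvW k (pvRLE (s.drop q)) chosen := by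
  intro fuel
  induction fuel with
  | zero =>
    intro q ban chosen hq _
    have : s.drop q = [] := List.drop_of_length_le (by omega)
    rw [this]
    rfl
  | succ fuel ih =>
    intro q ban chosen hq hinv
    have hqn : q < s.length := by omega
    have hdrop : s.drop q = s.getD q 0 :: s.drop (q + 1) := by
      rw [List.drop_eq_getElem_cons hqn]
      congr 1
      rw [List.getD_eq_getElem?_getD, List.getElem?_eq_getElem hqn]
      rfl
    have hbitq : Nat.testBit ban q = pvConf k chosen (s.getD q 0) := hinv q le_rfl hqn
    show (if (ban >>> q) &&& 1 = 1 then pvDfs (pvBuildF s k) s.length fuel (q + 1) ban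
      else pvDfs (pvBuildF s k) s.length fuel (q + 1) ban +
        pvDfs (pvBuildF s k) s.length fuel (q + 1) (pvRowBan (pvBuildF s k) s.length q ban)) = _
    by_cases hc : pvConf k chosen (s.getD q 0) = true
    · rw [if_pos ((pvTest ban q).mpr (hbitq.trans hc))]
      rw [ih (q + 1) ban chosen (by omega) (fun t ht1 ht2 => hinv t (by omega) ht2)]
      rw [hdrop, pvW_cons_banned k _ _ _ hc]
    · have hcf : pvConf k chosen (s.getD q 0) = false := by simpa using hc
      rw [if_neg (fun hb => hc (hbitq.symm.trans (by rw [(pvTest ban q).mp hb])))]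
      have key : ∀ t, q + 1 ≤ t → t < s.length →
          Nat.testBit (pvRowBan (pvBuildF s k) s.length q ban) t
            = pvConf k (s.getD q 0 :: chosen) (s.getD t 0) := by
        intro t ht1 ht2
        rw [pvRowBan_testBit, hinv t (by omega) ht2, pvConf_cons]
        cases hg : pvGet2 (pvBuildF s k) q t with
        | true =>
          have hd : s.getD t 0 - s.getD q 0 = k := by
            rcases (pvBuildF_get s k q t).mp hg with ⟨h1, _, _⟩ | ⟨_, _, h3⟩
            · omega
            · exact h3
          have hb : (s.getD t 0 - s.getD q 0 == k) = true := by simpa using hd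
          rw [hb, show decide (t < s.length) = true by simpa using ht2]
          simp only [Bool.and_true, Bool.or_true, Bool.true_or]
        | false =>
          have hd : ¬ (s.getD t 0 - s.getD q 0 = k) := by
            intro hcontr
            have := (pvBuildF_get s k q t).mpr (Or.inr ⟨by omega, ht2, hcontr⟩)
            rw [hg] at this
            cases this
          have hb : (s.getD t 0 - s.getD q 0 == k) = false := by simpa using hd
          rw [hb]
          simp only [Bool.and_false, Bool.or_false, Bool.false_or]
      rw [ih (q + 1) ban chosen (by omega) (fun t ht1 ht2 => hinv t (by omega) ht2),
        ih (q + 1) _ (s.getD q 0 :: chosen) (by omega) key]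
      rw [hdrop, pvW_cons_free k _ _ _ hcf]

-- ===== RLE lemmas =====
theorem pvGetD_lt {l : List Int} {a : Nat} (h : a < l.length) : l.getD a 0 = l[a] := by
  rw [List.getD_eq_getElem?_getD, List.getElem?_eq_getElem h]
  rfl

theorem pvRLE_sum (l : List Int) : ((pvRLE l).map (·.2)).sum = l.length := by
  induction l with
  | nil => rfl
  | cons v t ih =>
    cases hR : pvRLE t with
    | nil =>
      rw [hR] at ih
      simp at ih
      simp only [pvRLE, hR, List.map_cons, List.map_nil, List.sum_cons, List.sum_nil,
        List.length_cons]
      omega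
    | cons q r =>
      obtain ⟨w, c⟩ := q
      rw [hR] at ih
      simp only [List.map_cons, List.sum_cons] at ih
      by_cases hvw : v = w
      · simp only [pvRLE, hR, if_pos hvw, List.map_cons, List.sum_cons, List.length_cons]
        omega
      · simp only [pvRLE, hR, if_neg hvw, List.map_cons, List.sum_cons, List.length_cons]
        omega

theorem pvRLE_mem_fst (l : List Int) : ∀ p ∈ pvRLE l, p.1 ∈ l := by
  induction l with
  | nil => intro p h; cases h
  | cons v t ih =>
    intro p hp
    cases hR : pvRLE t with
    | nil =>
      simp only [pvRLE, hR] at hp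
      simp at hp
      simp [hp]
    | cons q r =>
      obtain ⟨w, c⟩ := q
      by_cases hvw : v = w
      · simp only [pvRLE, hR, if_pos hvw] at hp
        rcases List.mem_cons.mp hp with h | h
        · subst h
          simp [hvw]
        · exact List.mem_cons_of_mem _ (ih _ (hR ▸ List.mem_cons_of_mem _ h))
      · simp only [pvRLE, hR, if_neg hvw] at hp
        rcases List.mem_cons.mp hp with h | h
        · subst h; simp
        · exact List.mem_cons_of_mem _ (ih _ (hR ▸ h))

theorem pvRLE_fst_pairwise (l : List Int) (h : l.Pairwise (· ≤ ·)) :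
    ((pvRLE l).map (·.1)).Pairwise (· < ·) := by
  induction l with
  | nil => simp [pvRLE]
  | cons v t ih =>
    rw [List.pairwise_cons] at h
    obtain ⟨hv, ht⟩ := h
    have iht := ih ht
    cases hR : pvRLE t with
    | nil => simp [pvRLE, hR]
    | cons q r =>
      obtain ⟨w, c⟩ := q
      rw [hR] at iht
      by_cases hvw : v = w
      · simp only [pvRLE, hR, if_pos hvw]
        simpa using iht
      · simp only [pvRLE, hR, if_neg hvw]
        simp only [List.map_cons, List.pairwise_cons] at iht ⊢
        refine ⟨?_, iht⟩
        intro x hx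
        have hwt : w ∈ t := pvRLE_mem_fst t (w, c) (hR ▸ List.mem_cons_self)
        have hvw' : v < w := lt_of_le_of_ne (hv _ hwt) hvw
        rcases List.mem_cons.mp hx with h' | h'
        · subst h'; exact hvw'
        · exact lt_trans hvw' (iht.1 _ h')

theorem pvRLE_counts_one (l : List Int) (h : l.Nodup) : ∀ p ∈ pvRLE l, p.2 = 1 := by
  induction l with
  | nil => intro p hp; cases hp
  | cons v t ih =>
    rw [List.nodup_cons] at h
    obtain ⟨hv, ht⟩ := h
    intro p hp
    cases hR : pvRLE t with
    | nil =>
      simp only [pvRLE, hR] at hp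
      simp at hp
      rw [hp]
    | cons q r =>
      obtain ⟨w, c⟩ := q
      by_cases hvw : v = w
      · exact absurd (hvw ▸ pvRLE_mem_fst t (w, c) (hR ▸ List.mem_cons_self)) hv
      · simp only [pvRLE, hR, if_neg hvw] at hp
        rcases List.mem_cons.mp hp with h' | h'
        · rw [h']
        · exact ih ht p (hR ▸ h')

-- ===== pvW with no conflicts: a plain product =====
theorem pvW_all_free (k : Int) :
    ∀ (G : List (Int × Nat)) (chosen : List Int),
      G.Pairwise (fun p q => ¬(q.1 - p.1 = k)) →
      (∀ p ∈ G, pvConf k chosen p.1 = false) →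
      pvW k G chosen = (G.map (fun p => 1 + pvWt k p.2)).prod := by
  intro G
  induction G with
  | nil => intro chosen _ _; rfl
  | cons p G ih =>
    intro chosen hpw hconf
    obtain ⟨v, c⟩ := p
    rw [List.pairwise_cons] at hpw
    obtain ⟨hhead, htail⟩ := hpw
    have h1 : pvW k G chosen = (G.map (fun p => 1 + pvWt k p.2)).prod :=
      ih chosen htail (fun q hq => hconf q (List.mem_cons_of_mem _ hq))
    have h2 : pvW k G (v :: chosen) = (G.map (fun p => 1 + pvWt k p.2)).prod := by
      refine ih (v :: chosen) htail ?_
      intro q hq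
      rw [pvConf_cons]
      have hb : (q.1 - v == k) = false := by
        simpa using hhead q hq
      rw [hb, hconf q (List.mem_cons_of_mem _ hq)]
      rfl
    simp only [pvW, hconf (v, c) (List.mem_cons_self ..), Bool.false_eq_true, if_false,
      List.map_cons, List.prod_cons, h1, h2]
    ring

theorem pvProdPow (G : List (Int × Nat)) (k : Int) (hk : ¬ k = 0) :
    (G.map (fun p => 1 + pvWt k p.2)).prod = 2 ^ ((G.map (·.2)).sum) := by
  induction G with
  | nil => rfl
  | cons p G ih =>
    simp only [List.map_cons, List.prod_cons, List.sum_cons, pow_add]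
    rw [ih]
    simp only [pvWt, if_neg hk]
    ring

-- allFalse ↔ no matrix entry is set
theorem pvAllFalse_iff (s : List Int) (k : Int) :
    ((pvBuildF s k).all (fun row => row.all (fun x => x == false)) = true) ↔
      ∀ a b : Nat, pvGet2 (pvBuildF s k) a b = false := by
  constructor
  · intro h a b
    rw [List.all_eq_true] at h
    unfold pvGet2
    by_cases ha : a < (pvBuildF s k).length
    · have hrow : (pvBuildF s k).getD a [] = (pvBuildF s k)[a] := by
        rw [List.getD_eq_getElem?_getD, List.getElem?_eq_getElem ha]
        rfl
      rw [hrow]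
      by_cases hb : b < ((pvBuildF s k)[a]).length
      · have hcell : ((pvBuildF s k)[a]).getD b false = ((pvBuildF s k)[a])[b] := by
          rw [List.getD_eq_getElem?_getD, List.getElem?_eq_getElem hb]
          rfl
        rw [hcell]
        have h2 := h _ (List.getElem_mem ha)
        rw [List.all_eq_true] at h2
        simpa using h2 _ (List.getElem_mem hb)
      · rw [List.getD_eq_getElem?_getD, List.getElem?_eq_none (by omega), Option.getD_none]
    · have hrow : (pvBuildF s k).getD a [] = ([] : List Bool) := by
        rw [List.getD_eq_getElem?_getD, List.getElem?_eq_none (by omega), Option.getD_none]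
      rw [hrow]
      rfl
  · intro h
    rw [List.all_eq_true]
    intro row hrow
    rw [List.all_eq_true]
    intro x hx
    obtain ⟨a, ha, hae⟩ := List.getElem_of_mem hrow
    obtain ⟨b, hb, hbe⟩ := List.getElem_of_mem hx
    have hgg := h a b
    unfold pvGet2 at hgg
    have hrowa : (pvBuildF s k).getD a [] = row := by
      rw [List.getD_eq_getElem?_getD, List.getElem?_eq_getElem ha]
      simpa using hae
    rw [hrowa] at hgg
    have hcell : row.getD b false = x := by
      rw [List.getD_eq_getElem?_getD, List.getElem?_eq_getElem hb]
      simpa using hbe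
    rw [hcell] at hgg
    simp [hgg]

theorem pvLA (nums : List Int) (k : Int) :
    beautifulSubsets nums k = pvW k (pvRLE (PySem.List.sorted nums (fun x => x) false)) [] - 1 := by
  set s := PySem.List.sorted nums (fun x => x) false with hs
  show (if (pvBuildF s k).all (fun row => row.all (fun x => x == false)) then
      (2 ^ s.length : Int) - 1
    else pvDfs (pvBuildF s k) s.length s.length 0 0 - 1) = pvW k (pvRLE s) [] - 1
  by_cases hAF : (pvBuildF s k).all (fun row => row.all (fun x => x == false)) = true
  · rw [if_pos hAF]
    have hsort : s.Pairwise (· ≤ ·) := by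
      have := PySem.List.sorted_pairwise (xs := nums) (key := fun x => x)
      simpa using this
    have hne := (pvAllFalse_iff s k).mp hAF
    have hnopair : ∀ a b : Nat, b < a → a < s.length → ¬ (s.getD a 0 - s.getD b 0 = k) := by
      intro a b hba han hc
      have := (pvBuildF_get s k a b).mpr (Or.inl ⟨hba, han, hc⟩)
      rw [hne a b] at this
      cases this
    have hmono := List.pairwise_iff_getElem.mp hsort
    have hPW : (pvRLE s).Pairwise (fun p q => ¬(q.1 - p.1 = k)) := by
      have hfst := pvRLE_fst_pairwise s hsort
      rw [List.pairwise_map] at hfst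
      refine hfst.imp_of_mem ?_
      intro p q hp hq hpq hk'
      obtain ⟨j, hj, hje⟩ := List.getElem_of_mem (pvRLE_mem_fst s p hp)
      obtain ⟨i, hi, hie⟩ := List.getElem_of_mem (pvRLE_mem_fst s q hq)
      have hji : j < i := by
        rcases Nat.lt_trichotomy j i with h | h | h
        · exact h
        · exfalso
          subst h
          rw [hje] at hie
          rw [hie] at hpq
          exact lt_irrefl _ hpq
        · exact absurd (hmono i j hi hj h) (by rw [hie, hje]; exact not_le.mpr hpq)
      exact hnopair i j hji hi (by rw [pvGetD_lt hi, pvGetD_lt hj, hie, hje]; exact hk')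
    have key : pvW k (pvRLE s) [] = ((pvRLE s).map (fun p => 1 + pvWt k p.2)).prod :=
      pvW_all_free k _ [] hPW (fun p _ => rfl)
    rw [key]
    by_cases hk : k = 0
    · subst hk
      have hnd : s.Nodup := by
        rw [List.Nodup, List.pairwise_iff_getElem]
        intro i j hi hj hij he
        exact hnopair j i hij hj (by rw [pvGetD_lt hj, pvGetD_lt hi, he]; ring)
      have hones := pvRLE_counts_one s hnd
      have hmap : (pvRLE s).map (fun p => 1 + pvWt (0 : Int) p.2) =
          List.replicate (pvRLE s).length 2 := by
        rw [List.eq_replicate_iff]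
        refine ⟨by simp, ?_⟩
        intro b hb
        obtain ⟨p, hp, hpe⟩ := List.mem_map.mp hb
        rw [← hpe, hones p hp]
        rfl
      have hlen : ((pvRLE s).length : Int) = (s.length : Int) := by
        have h1 := pvRLE_sum s
        have h2 : (pvRLE s).map (·.2) = List.replicate (pvRLE s).length 1 := by
          rw [List.eq_replicate_iff]
          refine ⟨by simp, ?_⟩
          intro b hb
          obtain ⟨p, hp, hpe⟩ := List.mem_map.mp hb
          rw [← hpe, hones p hp]
        rw [h2] at h1
        simp at h1
        exact_mod_cast h1
      rw [hmap, List.prod_replicate]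
      congr 2
      exact_mod_cast hlen.symm
    · rw [pvProdPow _ _ hk, pvRLE_sum]
  · rw [if_neg hAF]
    congr 1
    have := pvMain s k s.length 0 0 [] (by omega)
      (fun t _ _ => by simp [Nat.zero_testBit, pvConf])
    rwa [List.drop_zero] at this

theorem pvFoldlMulMap {α : Type} (l : List α) (F : α → Int) (init : Int) :
    l.foldl (fun t x => t * F x) init = init * (l.map F).prod := by
  induction l generalizing init with
  | nil => simp
  | cons x l ih => simp [ih, mul_assoc]

theorem pvRLE_fst_mem_iff (l : List Int) (x : Int) :
    x ∈ (pvRLE l).map (·.1) ↔ x ∈ l := by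
  constructor
  · intro h
    obtain ⟨p, hp, hpe⟩ := List.mem_map.mp h
    exact hpe ▸ pvRLE_mem_fst l p hp
  · intro h
    induction l with
    | nil => cases h
    | cons v t ih =>
      cases hR : pvRLE t with
      | nil =>
        simp only [pvRLE, hR]
        rcases List.mem_cons.mp h with h' | h'
        · simp [h']
        · have := ih h'
          rw [hR] at this
          simp at this
      | cons q r =>
        obtain ⟨w, c⟩ := q
        by_cases hvw : v = w
        · simp only [pvRLE, hR, if_pos hvw]
          rcases List.mem_cons.mp h with h' | h'
          · subst h'
            simp [hvw]
          · have := ih h'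
            rw [hR] at this
            simpa using this
        · simp only [pvRLE, hR, if_neg hvw]
          rcases List.mem_cons.mp h with h' | h'
          · simp [h']
          · have := ih h'
            rw [hR] at this
            simp only [List.map_cons] at this ⊢
            exact List.mem_cons_of_mem _ this

theorem pvRLE_count (l : List Int) (h : l.Pairwise (· ≤ ·)) :
    ∀ p ∈ pvRLE l, p.2 = l.count p.1 := by
  induction l with
  | nil => intro p hp; cases hp
  | cons v t ih =>
    rw [List.pairwise_cons] at h
    obtain ⟨hv, ht⟩ := h
    have hfst := pvRLE_fst_pairwise (v :: t) (List.pairwise_cons.mpr ⟨hv, ht⟩)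
    intro p hp
    cases hR : pvRLE t with
    | nil =>
      simp only [pvRLE, hR] at hp
      simp at hp
      have htn : t = [] := by
        cases t with
        | nil => rfl
        | cons a t' =>
          exfalso
          have : a ∈ (pvRLE (a :: t')).map (·.1) := (pvRLE_fst_mem_iff _ _).mpr (by simp)
          rw [hR] at this
          cases this
      subst htn
      rw [hp]
      simp
    | cons q r =>
      obtain ⟨w, c⟩ := q
      by_cases hvw : v = w
      · subst hvw
        simp only [pvRLE, hR, if_pos rfl, if_true] at hp
        rcases List.mem_cons.mp hp with h' | h'
        · have hhead := ih ht (v, c) (hR ▸ List.mem_cons_self)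
          simp only at hhead
          rw [h']
          simp only [List.count_cons_self]
          omega
        · have hne : p.1 ≠ v := by
            have hpw : ((pvRLE (v :: t)).map (·.1)).Pairwise (· < ·) :=
              pvRLE_fst_pairwise _ (List.pairwise_cons.mpr ⟨hv, ht⟩)
            simp only [pvRLE, hR, if_pos rfl, if_true, List.map_cons, List.pairwise_cons] at hpw
            have := hpw.1 p.1 (List.mem_map.mpr ⟨p, h', rfl⟩)
            omega
          have := ih ht p (hR ▸ List.mem_cons_of_mem _ h')
          rw [show List.count p.1 (v :: t) = List.count p.1 t by
            simp [List.count_cons, Ne.symm hne]]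
          exact this
      · simp only [pvRLE, hR, if_neg hvw] at hp
        rcases List.mem_cons.mp hp with h' | h'
        · rw [h']
          simp only [List.count_cons_self]
          have : v ∉ t := by
            intro hvt
            have hmem : v ∈ (pvRLE t).map (·.1) := (pvRLE_fst_mem_iff _ _).mpr hvt
            rw [hR] at hmem
            simp only [List.map_cons] at hmem
            rcases List.mem_cons.mp hmem with h'' | h''
            · exact hvw h''
            · have hpw := pvRLE_fst_pairwise t ht
              rw [hR] at hpw
              simp only [List.map_cons, List.pairwise_cons] at hpw
              have hlt := hpw.1 v h''
              have hle := hv w (pvRLE_mem_fst t (w, c) (hR ▸ List.mem_cons_self))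
              omega
          rw [List.count_eq_zero.mpr this]
        · have hne : p.1 ≠ v := by
            have hle := hv p.1 (pvRLE_mem_fst t p (hR ▸ h'))
            have hpw := pvRLE_fst_pairwise t ht
            rw [hR] at hpw
            intro he
            have hwle : w ≤ p.1 := by
              rcases List.mem_cons.mp h' with h'' | h''
              · rw [h'']
              · simp only [List.map_cons, List.pairwise_cons] at hpw
                exact le_of_lt (hpw.1 p.1 (List.mem_map.mpr ⟨p, h'', rfl⟩))
            have hvw' : v < w ∨ v = w := by
              have := hv w (pvRLE_mem_fst t (w, c) (hR ▸ List.mem_cons_self))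
              omega
            omega
          rw [show List.count p.1 (v :: t) = List.count p.1 t by
            simp [List.count_cons, Ne.symm hne]]
          exact ih ht p (hR ▸ h')

theorem pvRLE_nodup_fst (l : List Int) (h : l.Pairwise (· ≤ ·)) :
    ((pvRLE l).map (·.1)).Nodup :=
  (pvRLE_fst_pairwise l h).imp (fun h' => ne_of_lt h')

theorem pvFoldlCongrMem {α β : Type} (l : List α) (f g : β → α → β) :
    ∀ (init : β), (∀ b x, x ∈ l → f b x = g b x) → l.foldl f init = l.foldl g init := by
  induction l with
  | nil => intro init _; rfl
  | cons x l ih =>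
    intro init h
    simp only [List.foldl_cons]
    rw [h init x (List.mem_cons_self)]
    exact ih _ (fun b y hy => h b y (List.mem_cons_of_mem _ hy))

theorem pvConf_filter (k : Int) (P : Int → Bool) (v : Int) (chosen : List Int)
    (h : ∀ u : Int, v - u = k → P u = true) :
    pvConf k (chosen.filter P) v = pvConf k chosen v := by
  induction chosen with
  | nil => rfl
  | cons u c ih =>
    by_cases hPu : P u = true
    · rw [List.filter_cons_of_pos hPu, pvConf_cons, pvConf_cons, ih]
    · rw [List.filter_cons_of_neg (by simpa using hPu), pvConf_cons, ih]
      have : (v - u == k) = false := by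
        by_cases hvu : v - u = k
        · exact absurd (h u hvu) hPu
        · simpa using hvu
      rw [this, Bool.false_or]

theorem pvW_split (k : Int) (P : Int → Bool)
    (hcross : ∀ u w : Int, w - u = k → P u = P w) :
    ∀ (G : List (Int × Nat)) (chosen : List Int),
      pvW k G chosen
        = pvW k (G.filter (fun p => P p.1)) (chosen.filter P)
          * pvW k (G.filter (fun p => !(P p.1))) (chosen.filter (fun u => !(P u))) := by
  intro G
  induction G with
  | nil => intro chosen; simp [pvW]
  | cons p G ih =>
    intro chosen
    obtain ⟨v, c⟩ := p
    by_cases hPv : P v = true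
    · rw [List.filter_cons_of_pos (by simpa using hPv),
        List.filter_cons_of_neg (by simp [hPv])]
      have hc1 : pvConf k (chosen.filter P) v = pvConf k chosen v :=
        pvConf_filter k P v chosen (fun u hu => by rw [hcross u v hu]; exact hPv)
      simp only [pvW, hc1]
      by_cases hcf : pvConf k chosen v = true
      · rw [hcf]
        simp only [if_true]
        rw [ih chosen]
        ring
      · have hcf' : pvConf k chosen v = false := by simpa using hcf
        rw [hcf']
        simp only [Bool.false_eq_true, if_false]
        have ihv := ih (v :: chosen)
        rw [List.filter_cons_of_pos (by simpa using hPv),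
          List.filter_cons_of_neg (by simp [hPv])] at ihv
        rw [ih chosen, ihv]
        ring
    · have hPv' : P v = false := by simpa using hPv
      rw [List.filter_cons_of_neg (by simp [hPv']),
        List.filter_cons_of_pos (by simp [hPv'])]
      have hc1 : pvConf k (chosen.filter (fun u => !(P u))) v = pvConf k chosen v :=
        pvConf_filter k _ v chosen (fun u hu => by rw [Bool.not_eq_true', hcross u v hu]; exact hPv')
      simp only [pvW, hc1]
      by_cases hcf : pvConf k chosen v = true
      · rw [hcf]
        simp only [if_true]
        rw [ih chosen]
        ring
      · have hcf' : pvConf k chosen v = false := by simpa using hcf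
        rw [hcf']
        simp only [Bool.false_eq_true, if_false]
        have ihv := ih (v :: chosen)
        rw [List.filter_cons_of_neg (by simp [hPv']),
          List.filter_cons_of_pos (by simp [hPv'])] at ihv
        rw [ih chosen, ihv]
        ring

theorem pvModCongr (k u w : Int) (hk : 0 < k) (h : k ∣ w - u) :
    PySem.Int.mod u k = PySem.Int.mod w k := by
  have hu := PySem.Int.floordiv_mul_add_mod u k
  have hw := PySem.Int.floordiv_mul_add_mod w k
  have hun := PySem.Int.mod_nonneg u hk
  have hul := PySem.Int.mod_lt u hk
  have hwn := PySem.Int.mod_nonneg w hk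
  have hwl := PySem.Int.mod_lt w hk
  have hdvd : k ∣ (PySem.Int.mod w k - PySem.Int.mod u k) := by
    obtain ⟨d, hd⟩ := h
    refine ⟨d - PySem.Int.floordiv w k + PySem.Int.floordiv u k, ?_⟩
    have h1 : PySem.Int.mod w k = w - PySem.Int.floordiv w k * k := by omega
    have h2 : PySem.Int.mod u k = u - PySem.Int.floordiv u k * k := by omega
    rw [h1, h2]
    have h3 : w - u = k * d := hd
    ring_nf
    nlinarith [h3]
  have habs : |PySem.Int.mod w k - PySem.Int.mod u k| < k := by
    rw [abs_lt]
    omega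
  have := Int.eq_zero_of_abs_lt_dvd hdvd habs
  omega

theorem pvGapLe (k a b : Int) (hk : 0 < k) (hab : a < b)
    (hmod : PySem.Int.mod a k = PySem.Int.mod b k) : a + k ≤ b := by
  have ha := PySem.Int.floordiv_mul_add_mod a k
  have hb := PySem.Int.floordiv_mul_add_mod b k
  have hdvd : k ∣ b - a := by
    refine ⟨PySem.Int.floordiv b k - PySem.Int.floordiv a k, ?_⟩
    have h1 : b = PySem.Int.floordiv b k * k + PySem.Int.mod b k := hb.symm
    have h2 : a = PySem.Int.floordiv a k * k + PySem.Int.mod a k := ha.symm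
    calc b - a = PySem.Int.floordiv b k * k + PySem.Int.mod b k
        - (PySem.Int.floordiv a k * k + PySem.Int.mod a k) := by rw [← h1, ← h2]
      _ = k * (PySem.Int.floordiv b k - PySem.Int.floordiv a k) := by rw [hmod]; ring
  have := Int.le_of_dvd (by omega) hdvd
  omega

theorem pvW_factor (k : Int) (hk : 0 < k) :
    ∀ (R : List Int), R.Nodup → ∀ (G : List (Int × Nat)),
      (∀ p ∈ G, PySem.Int.mod p.1 k ∈ R) →
      pvW k G []
        = (R.map (fun r => pvW k (G.filter (fun p => PySem.Int.mod p.1 k == r)) [])).prod := by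
  intro R
  induction R with
  | nil =>
    intro _ G hcov
    cases G with
    | nil => rfl
    | cons p G => exact absurd (hcov p (List.mem_cons_self)) (by simp)
  | cons r R ih =>
    intro hnd G hcov
    rw [List.nodup_cons] at hnd
    obtain ⟨hr, hndR⟩ := hnd
    have hsplit := pvW_split k (fun v => PySem.Int.mod v k == r)
      (fun u w huw => by
        have := pvModCongr k u w hk ⟨1, by omega⟩
        simp [this]) G []
    simp only [List.filter_nil] at hsplit
    rw [hsplit, List.map_cons, List.prod_cons]
    have h2 := ih hndR (G.filter (fun p => !(PySem.Int.mod p.1 k == r)))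
      (fun p hp => by
        have hm := List.mem_filter.mp hp
        have := hcov p hm.1
        rcases List.mem_cons.mp this with h | h
        · exact absurd (by simpa using h) (by simpa using hm.2)
        · exact h)
    rw [h2]
    congr 1
    congr 1
    refine List.map_congr_left ?_
    intro r' hr'
    congr 1
    rw [List.filter_filter]
    refine List.filter_congr ?_
    intro p hp
    by_cases hpr : PySem.Int.mod p.1 k = r'
    · have hnr : ¬ PySem.Int.mod p.1 k = r := fun he => hr (by rw [show r = r' by rw [← he, hpr]]; exact hr')
      simp [hpr]
      intro he
      exact hnr (by rw [hpr, he])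
    · simp [hpr]

theorem pvFoldB (k : Int) :
    ∀ (G : List (Int × Nat)) (sk tk : Int) (po : Option Int),
      ((G.foldl (fun st p => pvStepB k st p.1 (pvWt k p.2)) (sk, tk, po)).1
        + (G.foldl (fun st p => pvStepB k st p.1 (pvWt k p.2)) (sk, tk, po)).2.1)
      = sk * pvWc k G none + tk * pvWc k G po := by
  intro G
  induction G with
  | nil =>
    intro sk tk po
    simp [pvWc]
  | cons p G ih =>
    intro sk tk po
    obtain ⟨v, c⟩ := p
    rw [List.foldl_cons]
    cases po with
    | none =>
      rw [show pvStepB k (sk, tk, none) (v, c).1 (pvWt k (v, c).2)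
          = (sk + tk, (sk + tk) * pvWt k c, some v) from rfl]
      rw [ih]
      simp only [pvWc]
      rw [if_neg (by simp)]
      ring
    | some p' =>
      by_cases hc : v - p' = k
      · rw [show pvStepB k (sk, tk, some p') (v, c).1 (pvWt k (v, c).2)
            = (sk + tk, sk * pvWt k c, some v) by
          simp [pvStepB, hc]]
        rw [ih]
        simp only [pvWc]
        rw [if_neg (by simp), if_pos (by rw [show p' = v - k by omega])]
        ring
      · rw [show pvStepB k (sk, tk, some p') (v, c).1 (pvWt k (v, c).2)
            = (sk + tk, (sk + tk) * pvWt k c, some v) by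
          simp [pvStepB, hc]]
        rw [ih]
        simp only [pvWc]
        rw [if_neg (by simp), if_neg (by simp; omega)]
        ring

theorem pvChain (k : Int) (hk : 0 < k) :
    ∀ (G : List (Int × Nat)) (chosen : List Int) (po : Option Int),
      ((G.map (·.1)).Pairwise (fun a b => a + k ≤ b)) →
      (∀ w ∈ G.map (·.1), (pvConf k chosen w = true ↔ po = some (w - k))) →
      (∀ u, po = some u → ∀ w ∈ G.map (·.1), u < w) →
      pvW k G chosen = pvWc k G po := by
  intro G
  induction G with
  | nil => intro chosen po _ _ _; rfl
  | cons p G ih =>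
    intro chosen po hgap hconf hpo
    obtain ⟨v, c⟩ := p
    simp only [List.map_cons, List.pairwise_cons] at hgap
    obtain ⟨hgv, hgG⟩ := hgap
    have hskip : pvW k G chosen = pvWc k G none := by
      refine ih chosen none hgG ?_ (by intro u hu; cases hu)
      intro w hw
      constructor
      · intro hcw
        exfalso
        have hpoe := (hconf w (List.mem_cons_of_mem _ hw)).mp hcw
        have hu := hpo (w - k) hpoe v (List.mem_cons_self)
        have := hgv w hw
        omega
      · intro h
        cases h
    simp only [pvW, pvWc]
    by_cases hcv : pvConf k chosen v = true
    · rw [hcv, if_pos ((hconf v (List.mem_cons_self)).mp hcv), hskip]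
      simp
    · have hcv' : pvConf k chosen v = false := by simpa using hcv
      rw [hcv']
      have hpne : ¬ po = some (v - k) := fun h => hcv ((hconf v (List.mem_cons_self)).mpr h)
      rw [if_neg hpne]
      simp only [Bool.false_eq_true, if_false]
      have htake : pvW k G (v :: chosen) = pvWc k G (some v) := by
        refine ih (v :: chosen) (some v) hgG ?_ ?_
        · intro w hw
          rw [pvConf_cons]
          constructor
          · intro hor
            rcases Bool.or_eq_true_iff.mp hor with h | h
            · have : w - v = k := by simpa using h
              rw [show w - k = v by omega]
            · exfalso
              have hpoe := (hconf w (List.mem_cons_of_mem _ hw)).mp h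
              have hu := hpo (w - k) hpoe v (List.mem_cons_self)
              have := hgv w hw
              omega
          · intro h
            have hv : v = w - k := by
              have := Option.some.inj h
              omega
            rw [Bool.or_eq_true_iff]
            exact Or.inl (by simpa using (by omega : w - v = k))
        · intro u hu w hw
          have huv : u = v := Option.some.inj hu.symm
          have := hgv w hw
          omega
      rw [hskip, htake]

theorem pvGroupsGetD (k : Int) :
    ∀ (l : List Int) (g : PySem.Dict Int (List Int)) (r : Int),
      (l.foldl (fun g v => g.modify (PySem.Int.mod v k) [] (· ++ [v])) g).getD r []
        = g.getD r [] ++ l.filter (fun v => PySem.Int.mod v k == r) := by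
  intro l
  induction l with
  | nil => intro g r; simp
  | cons v t ih =>
    intro g r
    rw [List.foldl_cons, ih]
    by_cases hvr : PySem.Int.mod v k = r
    · rw [List.filter_cons_of_pos (by simpa using hvr)]
      rw [PySem.Dict.getD_modify, if_pos hvr.symm]
      subst hvr
      simp
    · rw [List.filter_cons_of_neg (by simpa using hvr)]
      rw [PySem.Dict.getD_modify, if_neg (fun h => hvr h.symm)]

theorem pvKPos (nums : List Int) (k : Int) (hk : 0 < k) :
    beautifulSubsets_alt nums k
      = pvW k (pvRLE (PySem.List.sorted nums (fun x => x) false)) [] - 1 := by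
  set s := PySem.List.sorted nums (fun x => x) false with hs
  have hsort : s.Pairwise (· ≤ ·) := by
    have := PySem.List.sorted_pairwise (xs := nums) (key := fun x => x)
    simpa using this
  have hperm : s.Perm nums := PySem.List.sorted_perm nums _ false
  have hfstlt := pvRLE_fst_pairwise s hsort
  simp only [beautifulSubsets_alt, PySem.Dict.foldl_insert_getD_add_one_eq_counter]
  rw [if_neg (by omega), if_neg (by omega)]
  set cnt := PySem.Dict.counter nums with hcnt
  set grp := cnt.keys.foldl (fun g v => g.modify (PySem.Int.mod v k) [] (· ++ [v]))
    PySem.Dict.empty with hgrp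
  have hkeysnd : cnt.keys.Nodup := PySem.Dict.nodup_keys_counter nums
  have hmemkeys : ∀ x : Int, x ∈ cnt.keys ↔ x ∈ s := by
    intro x
    rw [hcnt, PySem.Dict.keys_counter, PySem.Set.mem_ofList, hperm.mem_iff]
  have hgkeys : grp.keys = PySem.Set.ofList (cnt.keys.map (fun v => PySem.Int.mod v k)) := by
    rw [hgrp, PySem.Dict.keys_foldl_modify_key cnt.keys (fun v => PySem.Int.mod v k)
      ([] : List Int) (fun _ x => (· ++ [x])) PySem.Dict.empty]
    rw [PySem.Dict.keys_empty]
    rfl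
  have hgnd : grp.keys.Nodup := by
    rw [hgkeys]
    exact PySem.Set.nodup_ofList _
  have hgetD : ∀ r : Int, grp.getD r [] = cnt.keys.filter (fun v => PySem.Int.mod v k == r) := by
    intro r
    rw [hgrp, pvGroupsGetD k cnt.keys PySem.Dict.empty r]
    simp
  have hvals : grp.values = grp.keys.map (fun r => grp.getD r []) :=
    PySem.Dict.values_eq_map_keys grp hgnd []
  -- outer fold to product
  rw [pvFoldlMulMap grp.values
    (fun vs => ((PySem.List.sorted vs (fun x => x) false).foldl
        (fun st v => pvStepB k st v ((2 ^ (cnt.getD v 0).toNat : Int) - 1))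
        ((1 : Int), (0 : Int), (none : Option Int))).1
      + ((PySem.List.sorted vs (fun x => x) false).foldl
        (fun st v => pvStepB k st v ((2 ^ (cnt.getD v 0).toNat : Int) - 1))
        ((1 : Int), (0 : Int), (none : Option Int))).2.1) 1, one_mul]
  congr 1
  -- coverage for the factorization
  have hcov : ∀ p ∈ pvRLE s, PySem.Int.mod p.1 k ∈ grp.keys := by
    intro p hp
    rw [hgkeys, PySem.Set.mem_ofList]
    exact List.mem_map.mpr ⟨p.1, (hmemkeys p.1).mpr (pvRLE_mem_fst s p hp), rfl⟩
  rw [pvW_factor k hk grp.keys hgnd (pvRLE s) hcov, hvals, List.map_map]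
  congr 1
  refine List.map_congr_left ?_
  intro r _
  show (((PySem.List.sorted (grp.getD r []) (fun x => x) false).foldl
      (fun st v => pvStepB k st v ((2 ^ (cnt.getD v 0).toNat : Int) - 1))
      ((1 : Int), (0 : Int), (none : Option Int))).1
    + ((PySem.List.sorted (grp.getD r []) (fun x => x) false).foldl
      (fun st v => pvStepB k st v ((2 ^ (cnt.getD v 0).toNat : Int) - 1))
      ((1 : Int), (0 : Int), (none : Option Int))).2.1)
    = pvW k ((pvRLE s).filter (fun p => PySem.Int.mod p.1 k == r)) []
  set Mr := (pvRLE s).filter (fun p => PySem.Int.mod p.1 k == r) with hMr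
  have hMrsub : (Mr.map (·.1)).Sublist ((pvRLE s).map (·.1)) :=
    List.Sublist.map _ List.filter_sublist
  have hMrlt : (Mr.map (·.1)).Pairwise (· < ·) := hfstlt.sublist hMrsub
  have hMrres : ∀ x ∈ Mr.map (·.1), PySem.Int.mod x k = r := by
    intro x hx
    obtain ⟨p, hp, hpe⟩ := List.mem_map.mp hx
    have := (List.mem_filter.mp hp).2
    rw [← hpe]
    simpa using this
  have hsorted_class : PySem.List.sorted (grp.getD r []) (fun x => x) false = Mr.map (·.1) := by
    rw [hgetD r]
    refine PySem.List.sorted_eq_of_perm_of_pairwise_lt _ _ _ ?_ hMrlt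
    rw [List.perm_ext_iff_of_nodup (hMrlt.imp (fun h => ne_of_lt h)) (hkeysnd.filter _)]
    intro x
    rw [List.mem_filter]
    constructor
    · intro hx
      obtain ⟨p, hp, hpe⟩ := List.mem_map.mp hx
      obtain ⟨hpG, hpr⟩ := List.mem_filter.mp hp
      refine ⟨(hmemkeys x).mpr ?_, by rw [← hpe]; exact hpr⟩
      rw [← hpe]
      exact (pvRLE_fst_mem_iff s p.1).mp (List.mem_map.mpr ⟨p, hpG, rfl⟩)
    · rintro ⟨hxk, hxr⟩
      have hxs : x ∈ (pvRLE s).map (·.1) := (pvRLE_fst_mem_iff s x).mpr ((hmemkeys x).mp hxk)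
      obtain ⟨p, hp, hpe⟩ := List.mem_map.mp hxs
      exact List.mem_map.mpr ⟨p, List.mem_filter.mpr ⟨hp, by rw [hpe]; exact hxr⟩, hpe⟩
  rw [hsorted_class, List.foldl_map]
  rw [pvFoldlCongrMem Mr
    (fun st p => pvStepB k st p.1 ((2 ^ (cnt.getD p.1 0).toNat : Int) - 1))
    (fun st p => pvStepB k st p.1 (pvWt k p.2))
    ((1 : Int), (0 : Int), (none : Option Int))
    (fun st p hp => by
      dsimp only
      congr 1
      have hpG : p ∈ pvRLE s := (List.mem_filter.mp hp).1
      have hc : p.2 = nums.count p.1 := by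
        rw [pvRLE_count s hsort p hpG, hperm.count_eq]
      rw [hcnt, PySem.Dict.getD_counter]
      rw [pvWt, if_neg (by omega), hc]
      simp)]
  rw [pvFoldB k Mr 1 0 none]
  have hchain := pvChain k hk Mr [] none
    (by
      refine hMrlt.imp_of_mem ?_
      intro a b ha hb hab
      exact pvGapLe k a b hk hab (by rw [hMrres a ha, hMrres b hb]))
    (by
      intro w _
      constructor
      · intro h; cases h
      · intro h; cases h)
    (by intro u hu; cases hu)
  rw [← hchain]
  ring
theorem pvLB (nums : List Int) (k : Int) :
    beautifulSubsets_alt nums k = pvW k (pvRLE (PySem.List.sorted nums (fun x => x) false)) [] - 1 := by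
  set s := PySem.List.sorted nums (fun x => x) false with hs
  have hsort : s.Pairwise (· ≤ ·) := by
    have := PySem.List.sorted_pairwise (xs := nums) (key := fun x => x)
    simpa using this
  have hperm : s.Perm nums := PySem.List.sorted_perm nums _ false
  have hfst := pvRLE_fst_pairwise s hsort
  rw [List.pairwise_map] at hfst
  simp only [beautifulSubsets_alt, PySem.Dict.foldl_insert_getD_add_one_eq_counter]
  by_cases hkneg : k < 0
  · rw [if_pos hkneg]
    have hPW : (pvRLE s).Pairwise (fun p q => ¬(q.1 - p.1 = k)) :=
      hfst.imp (fun h hc => by omega)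
    rw [pvW_all_free k _ [] hPW (fun p _ => rfl), pvProdPow _ _ (by omega), pvRLE_sum]
    have : s.length = nums.length := hperm.length_eq
    rw [this]
  · by_cases hk0 : k = 0
    · subst hk0
      rw [if_neg (by omega), if_pos rfl]
      have hvals : (PySem.Dict.counter nums).values
          = (PySem.Set.ofList nums).map (fun v => (nums.count v : Int)) := by
        show ((PySem.Dict.counter nums).items).map (·.2)
            = (PySem.Set.ofList nums).map (fun v => (nums.count v : Int))
        rw [PySem.Dict.items_counter, List.map_map]
        rfl
      rw [hvals, pvFoldlMulMap, List.map_map, one_mul]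
      have hPW : (pvRLE s).Pairwise (fun p q => ¬(q.1 - p.1 = (0 : Int))) :=
        hfst.imp (fun h hc => by omega)
      rw [pvW_all_free (0 : Int) _ [] hPW (fun p _ => rfl)]
      have hmapeq : (pvRLE s).map (fun p => 1 + pvWt (0 : Int) p.2)
          = ((pvRLE s).map (·.1)).map (fun v => (nums.count v : Int) + 1) := by
        rw [List.map_map]
        refine List.map_congr_left ?_
        intro p hp
        show 1 + pvWt (0 : Int) p.2 = (nums.count p.1 : Int) + 1
        rw [pvWt, if_pos rfl, pvRLE_count s hsort p hp, hperm.count_eq]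
        ring
      rw [hmapeq]
      have hperm2 : ((pvRLE s).map (·.1)).Perm (PySem.Set.ofList nums) := by
        rw [List.perm_ext_iff_of_nodup (pvRLE_nodup_fst s hsort) (PySem.Set.nodup_ofList nums)]
        intro x
        rw [pvRLE_fst_mem_iff, PySem.Set.mem_ofList, hperm.mem_iff]
      rw [(hperm2.map (fun v => (nums.count v : Int) + 1)).prod_eq]
      rfl
    · exact pvKPos nums k (by omega)

-- ===== VERDICT (by name: the statement is the Claim_ definition above) =====
theorem beautifulSubsets_spec : Claim_equal_beautifulSubsets := by
  intro nums k _
  unfold Spec_beautifulSubsets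
  rw [pvLA, pvLB]
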